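-- pv_equiv track=rewrite | github.com/swan3938/AI | bluewow-activation/backend/app/services/matching.py | match_by_employee_id
-- ===== SOURCE A (Python) =====
-- from typing import List, Dict
--
-- def match_by_employee_id(roster: List[Dict], activation: List[Dict]) -> List[Dict]:
--     index = {r.get("employee_id"): r for r in roster if r.get("employee_id")}
--     out = []
--     for a in activation:
--         k = a.get("employee_id")
--         r = index.get(k)
--         if k and r:
--             m = {**r, **a}
--             out.append(m)
--     return out
-- ===== SOURCE B (Python) =====
-- def match_by_employee_id(roster, activation):
--     out = []
--     for a in activation:
--         k = a.get("employee_id")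
--         if not k:
--             continue
--         match = None
--         for r in roster:
--             if r.get("employee_id") == k:
--                 match = r
--         if match is not None:
--             out.append({**match, **a})
--     return out
-- ===== Notes on version B (the rewrite author's own statement) =====
-- stated objective: alternative
-- what changed: Replaces the prebuilt last-wins dict index with a direct nested join: for each activation record with a truthy employee_id, scan the whole roster keeping the last record whose employee_id equals it; Pre_ excludes only association lists that bind the same key twice in one record, which do not encode a Python dict.
import Mathlib
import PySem

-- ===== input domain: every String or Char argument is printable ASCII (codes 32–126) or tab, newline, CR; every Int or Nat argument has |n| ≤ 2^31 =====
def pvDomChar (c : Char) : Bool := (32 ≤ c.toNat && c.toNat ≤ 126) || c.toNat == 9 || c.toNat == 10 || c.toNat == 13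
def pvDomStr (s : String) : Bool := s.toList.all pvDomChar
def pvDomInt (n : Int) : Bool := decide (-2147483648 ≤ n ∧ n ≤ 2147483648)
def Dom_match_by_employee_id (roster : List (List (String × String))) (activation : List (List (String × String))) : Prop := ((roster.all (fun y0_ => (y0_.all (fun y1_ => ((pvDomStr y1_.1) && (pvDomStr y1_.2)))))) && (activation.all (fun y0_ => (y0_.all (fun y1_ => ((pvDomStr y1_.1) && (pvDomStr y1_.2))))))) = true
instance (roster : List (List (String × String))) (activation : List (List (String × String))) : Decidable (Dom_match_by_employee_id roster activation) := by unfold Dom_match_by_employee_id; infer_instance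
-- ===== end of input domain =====

-- B replaces A's prebuilt last-wins index dict with a direct nested join (per-activation
-- scan of the roster keeping the last match); same result, no index structure (alternative).

-- d.get(k) on a record (association list, first binding wins)
def recGet (d : List (String × String)) (k : String) : Option String :=
  match d with
  | [] => none
  | (k', v) :: rest => if k' = k then some v else recGet rest k

-- {**r, **a}: r's keys in r's order (a's value where a also binds the key), then a's new keys
def mergeRec (r a : List (String × String)) : List (String × String) :=
  r.map (fun p => (p.1, (recGet a p.1).getD p.2)) ++ a.filter (fun p => (recGet r p.1).isNone)

-- ===== PORT A =====
def match_by_employee_id (roster : List (List (String × String))) (activation : List (List (String × String))) : List (List (String × String)) :=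
  let index : PySem.Dict String (List (String × String)) :=
    roster.foldl (fun d r =>
      match recGet r "employee_id" with
      | some s => if s ≠ "" then d.insert s r else d
      | none => d) PySem.Dict.empty
  activation.foldl (fun out a =>
    match recGet a "employee_id" with
    | some k =>
      if k ≠ "" then
        match index.get? k with
        | some r => out ++ [mergeRec r a]
        | none => out
      else out
    | none => out) []

-- ===== PORT B =====
-- last roster record whose employee_id equals k (k already known truthy)
def lastRosterMatch (roster : List (List (String × String))) (k : String) : Option (List (String × String)) :=
  roster.foldl (fun best r => if recGet r "employee_id" = some k then some r else best) none

def match_by_employee_id_alt (roster : List (List (String × String))) (activation : List (List (String × String))) : List (List (String × String)) :=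
  activation.foldl (fun out a =>
    match recGet a "employee_id" with
    | some k =>
      if k ≠ "" then
        match lastRosterMatch roster k with
        | some r => out ++ [mergeRec r a]
        | none => out
      else out
    | none => out) []

-- ===== PRECONDITION & SPEC =====
-- Pre_ excludes only association lists that bind the same key twice inside one record
-- (e.g. two "employee_id" bindings): such a list does not encode a Python dict, so A's
-- behaviour there is not defined by the source; every real dict input satisfies Pre_.
def Pre_match_by_employee_id (roster : List (List (String × String))) (activation : List (List (String × String))) : Prop :=
  -- (i.e. no record binds a key such as "employee_id" twice)
  ∀ r ∈ roster ++ activation, (r.map Prod.fst).Nodup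
instance (roster : List (List (String × String))) (activation : List (List (String × String))) : Decidable (Pre_match_by_employee_id roster activation) := by unfold Pre_match_by_employee_id; infer_instance
def pvWitness_match_by_employee_id : (List (List (String × String))) × (List (List (String × String))) := ([[("employee_id", "e1"), ("name", "ann")]], [[("employee_id", "e1"), ("status", "on")]])
def Spec_match_by_employee_id (roster : List (List (String × String))) (activation : List (List (String × String))) (out : List (List (String × String))) : Prop := out = match_by_employee_id_alt roster activation
instance (roster : List (List (String × String))) (activation : List (List (String × String))) (out : List (List (String × String))) : Decidable (Spec_match_by_employee_id roster activation out) := by unfold Spec_match_by_employee_id; infer_instance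

-- ===== CLAIM (what is proved, stated in full; the proofs are below) =====
def Claim_equal_match_by_employee_id : Prop := ∀ (roster : List (List (String × String))) (activation : List (List (String × String))), Dom_match_by_employee_id roster activation → Pre_match_by_employee_id roster activation → Spec_match_by_employee_id roster activation (match_by_employee_id roster activation)

-- ===== LEMMAS AND PROOFS =====

-- A's index lookup at a truthy key equals B's last-match roster scan
theorem index_get_eq (k : String) (hk : k ≠ "") :
    ∀ (roster : List (List (String × String))) (d : PySem.Dict String (List (String × String))),
    (roster.foldl (fun d r =>
        match recGet r "employee_id" with
        | some s => if s ≠ "" then d.insert s r else d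
        | none => d) d).get? k
      = roster.foldl (fun best r => if recGet r "employee_id" = some k then some r else best) (d.get? k) := by
  intro roster
  induction roster with
  | nil => intro d; rfl
  | cons r rest ih =>
    intro d
    simp only [List.foldl_cons]
    rw [ih]
    congr 1
    cases h : recGet r "employee_id" with
    | none => simp
    | some s =>
      by_cases hs : s = ""
      · subst hs
        simp
        exact fun e => absurd e hk
      · by_cases hks : k = s
        · subst hks
          simp [hs, PySem.Dict.get?_insert_self]
        · simp [hs, PySem.Dict.get?_insert_of_ne _ _ hks]
          exact fun e => absurd e.symm hks

-- ===== VERDICT (by name: the statement is the Claim_ definition above) =====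
theorem match_by_employee_id_spec : Claim_equal_match_by_employee_id := by
  intro roster activation _ _
  unfold Spec_match_by_employee_id
  simp only [match_by_employee_id, match_by_employee_id_alt]
  congr 1
  funext out a
  cases h : recGet a "employee_id" with
  | none => rfl
  | some k =>
    by_cases hk : k = ""
    · simp [hk]
    · simp only [hk, ne_eq, not_false_eq_true, if_true]
      rw [index_get_eq k hk roster PySem.Dict.empty, PySem.Dict.get?_empty, lastRosterMatch]
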